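-- pv_equiv track=rewrite | github.com/HenryGreene10/propertyfish | scripts/ingest_dob_complaints.py | order_candidate_fields
-- ===== SOURCE A (Python) =====
-- from typing import Any, Dict, Iterable, List, Optional, Tuple
--
-- DATE_FIELD_PREFERENCES = [
--     "date_received",
--     "date_entered",
--     "inspection_date",
--     "last_inspection_date",
--     "last_status_date",
--     "date",
-- ]
--
-- def order_candidate_fields(fields: List[Tuple[str, str]]) -> List[Tuple[str, str]]:
--     ordered: List[Tuple[str, str]] = []
--     seen: set[str] = set()
--     for preferred in DATE_FIELD_PREFERENCES:
--         for field, dtype in fields: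
--             if field.lower() == preferred and field.lower() not in seen:
--                 ordered.append((field, dtype))
--                 seen.add(field.lower())
--     for field, dtype in fields:
--         if field.lower() not in seen:
--             ordered.append((field, dtype))
--             seen.add(field.lower())
--     return ordered
-- ===== SOURCE B (Python) =====
-- DATE_FIELD_PREFERENCES = [
--     "date_received",
--     "date_entered",
--     "inspection_date",
--     "last_inspection_date",
--     "last_status_date",
--     "date",
-- ]
--
-- def order_candidate_fields(fields):
--     rank = {p: i for i, p in enumerate(DATE_FIELD_PREFERENCES)}
--     default = len(DATE_FIELD_PREFERENCES)
--     deduped = []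
--     seen = set()
--     for field, dtype in fields:
--         key = field.lower()
--         if key not in seen:
--             seen.add(key)
--             deduped.append((field, dtype))
--     return sorted(deduped, key=lambda fd: rank.get(fd[0].lower(), default))
-- ===== Notes on version B (the rewrite author's own statement) =====
-- stated objective: idiomatic
-- what changed: Replaces A's nested loops (one full scan of fields per preference entry plus a second dedup scan) by a single dedup pass followed by a stable sort keyed on a rank dictionary built from the preference list.
import Mathlib
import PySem

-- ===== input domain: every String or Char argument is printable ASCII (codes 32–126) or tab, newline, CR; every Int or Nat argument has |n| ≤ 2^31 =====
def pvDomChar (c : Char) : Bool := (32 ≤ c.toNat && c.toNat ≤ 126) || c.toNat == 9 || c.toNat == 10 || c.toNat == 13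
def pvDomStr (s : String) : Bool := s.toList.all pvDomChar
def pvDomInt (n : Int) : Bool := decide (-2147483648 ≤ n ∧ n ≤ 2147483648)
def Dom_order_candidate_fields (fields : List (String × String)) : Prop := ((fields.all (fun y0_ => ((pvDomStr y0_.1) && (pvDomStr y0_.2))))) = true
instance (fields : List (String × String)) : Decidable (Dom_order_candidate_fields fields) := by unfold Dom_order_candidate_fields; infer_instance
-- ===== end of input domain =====

-- B replaces A's nested preference×fields scans by one dedup pass plus a stable sort under a rank dictionary (idiomatic; equal return values proved below).


-- DATE_FIELD_PREFERENCES (module constant shared by both ports)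
def pvPrefs : List String :=
  ["date_received", "date_entered", "inspection_date", "last_inspection_date", "last_status_date", "date"]

-- ===== PORT A =====
def order_candidate_fields (fields : List (String × String)) : List (String × String) :=
  let st1 :=
    pvPrefs.foldl
      (fun (st : List (String × String) × PySem.Set String) preferred =>
        fields.foldl
          (fun (st : List (String × String) × PySem.Set String) fd =>
            if PySem.Str.lower fd.1 == preferred && !(PySem.Set.contains st.2 (PySem.Str.lower fd.1)) then
              (st.1 ++ [fd], PySem.Set.add st.2 (PySem.Str.lower fd.1))
            else st)
          st)
      (([], PySem.Set.empty))
  let st2 :=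
    fields.foldl
      (fun (st : List (String × String) × PySem.Set String) fd =>
        if !(PySem.Set.contains st.2 (PySem.Str.lower fd.1)) then
          (st.1 ++ [fd], PySem.Set.add st.2 (PySem.Str.lower fd.1))
        else st)
      st1
  st2.1

-- ===== PORT B =====
def order_candidate_fields_alt (fields : List (String × String)) : List (String × String) :=
  let rank : PySem.Dict String Int :=
    (PySem.List.enumerate pvPrefs).foldl (fun d ip => PySem.Dict.insert d ip.2 ip.1) PySem.Dict.empty
  let default : Int := (pvPrefs.length : Int)
  let st :=
    fields.foldl
      (fun (st : List (String × String) × PySem.Set String) fd =>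
        if !(PySem.Set.contains st.2 (PySem.Str.lower fd.1)) then
          (st.1 ++ [fd], PySem.Set.add st.2 (PySem.Str.lower fd.1))
        else st)
      (([], PySem.Set.empty))
  PySem.List.sorted st.1 (fun fd => PySem.Dict.getD rank (PySem.Str.lower fd.1) default) false

-- ===== PRECONDITION & SPEC =====
def Spec_order_candidate_fields (fields : List (String × String)) (out : List (String × String)) : Prop := out = order_candidate_fields_alt fields
instance (fields : List (String × String)) (out : List (String × String)) : Decidable (Spec_order_candidate_fields fields out) := by unfold Spec_order_candidate_fields; infer_instance

-- ===== CLAIM (what is proved, stated in full; the proofs are below) =====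
def Claim_equal_order_candidate_fields : Prop := ∀ (fields : List (String × String)), Dom_order_candidate_fields fields → Spec_order_candidate_fields fields (order_candidate_fields fields)

-- ===== LEMMAS AND PROOFS =====

-- lowered field name, used as the dedup key by both programs
def lowerKey (fd : String × String) : String := PySem.Str.lower fd.1

-- first occurrences of `fields` whose lowered name is not in `s`, deduplicated by lowered name
def collect : List (String × String) → List String → List (String × String)
  | [], _ => []
  | fd :: fs, s => if lowerKey fd ∈ s then collect fs s else fd :: collect fs (s ++ [lowerKey fd])

theorem dedup_foldl (fields : List (String × String)) (acc : List (String × String)) (s : List String) :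
    fields.foldl
      (fun (st : List (String × String) × PySem.Set String) fd =>
        if !(PySem.Set.contains st.2 (PySem.Str.lower fd.1)) then
          (st.1 ++ [fd], PySem.Set.add st.2 (PySem.Str.lower fd.1))
        else st)
      (acc, s)
    = (acc ++ collect fields s, s ++ (collect fields s).map lowerKey) := by
  induction fields generalizing acc s with
  | nil => simp [collect]
  | cons fd fs ih =>
    simp only [List.foldl_cons]
    by_cases h : PySem.Str.lower fd.1 ∈ s
    · rw [if_neg (by simp [PySem.Set.contains, h]), ih]
      simp [collect, lowerKey, h]
    · have ha : PySem.Set.add s (PySem.Str.lower fd.1) = s ++ [PySem.Str.lower fd.1] := by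
        simp [PySem.Set.add, PySem.Set.contains, h]
      rw [if_pos (by simp [PySem.Set.contains, h]), ha, ih]
      simp [collect, lowerKey, h]

theorem inner_mem (p : String) (fields : List (String × String))
    (acc : List (String × String)) (s : List String) (h : p ∈ s) :
    fields.foldl
      (fun (st : List (String × String) × PySem.Set String) fd =>
        if PySem.Str.lower fd.1 == p && !(PySem.Set.contains st.2 (PySem.Str.lower fd.1)) then
          (st.1 ++ [fd], PySem.Set.add st.2 (PySem.Str.lower fd.1))
        else st)
      (acc, s)
    = (acc, s) := by
  induction fields with
  | nil => rfl
  | cons fd fs ih =>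
    simp only [List.foldl_cons]
    rw [if_neg]
    · exact ih
    · by_cases hl : PySem.Str.lower fd.1 = p
      · simp [hl, PySem.Set.contains, h]
      · simp [hl]

theorem inner_none (p : String) (fields : List (String × String))
    (acc : List (String × String)) (s : List String)
    (hf : fields.find? (fun fd => PySem.Str.lower fd.1 == p) = none) :
    fields.foldl
      (fun (st : List (String × String) × PySem.Set String) fd =>
        if PySem.Str.lower fd.1 == p && !(PySem.Set.contains st.2 (PySem.Str.lower fd.1)) then
          (st.1 ++ [fd], PySem.Set.add st.2 (PySem.Str.lower fd.1))
        else st)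
      (acc, s)
    = (acc, s) := by
  induction fields generalizing acc with
  | nil => rfl
  | cons fd fs ih =>
    simp only [List.foldl_cons]
    by_cases hl : (PySem.Str.lower fd.1 == p) = true
    · simp only [List.find?_cons, hl] at hf; exact absurd hf (by simp)
    · have hl' : (PySem.Str.lower fd.1 == p) = false := by simpa using hl
      simp only [List.find?_cons, hl'] at hf
      rw [if_neg (by simp [hl'])]
      exact ih acc hf

theorem inner_some (p : String) (fields : List (String × String))
    (acc : List (String × String)) (s : List String) (hp : p ∉ s)
    (fd0 : String × String)
    (hf : fields.find? (fun fd => PySem.Str.lower fd.1 == p) = some fd0) :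
    fields.foldl
      (fun (st : List (String × String) × PySem.Set String) fd =>
        if PySem.Str.lower fd.1 == p && !(PySem.Set.contains st.2 (PySem.Str.lower fd.1)) then
          (st.1 ++ [fd], PySem.Set.add st.2 (PySem.Str.lower fd.1))
        else st)
      (acc, s)
    = (acc ++ [fd0], s ++ [p]) := by
  induction fields generalizing acc with
  | nil => simp at hf
  | cons fd fs ih =>
    simp only [List.foldl_cons]
    by_cases hl : PySem.Str.lower fd.1 = p
    · simp only [List.find?_cons, show (PySem.Str.lower fd.1 == p) = true by simp [hl]] at hf
      rw [if_pos (by simp [hl, PySem.Set.contains, hp]), show PySem.Set.add s (PySem.Str.lower fd.1) = s ++ [p] by simp [PySem.Set.add, PySem.Set.contains, hl, hp]]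
      rw [inner_mem p fs _ _ (by simp)]
      simp at hf
      simp [hf]
    · simp only [List.find?_cons, show (PySem.Str.lower fd.1 == p) = false by simp [hl]] at hf
      rw [if_neg (by simp [hl])]
      exact ih acc hf

theorem phase1 (fields : List (String × String)) (ps : List String)
    (acc : List (String × String)) (s : List String)
    (hnd : ps.Nodup) (hdis : ∀ p ∈ ps, p ∉ s) :
    ps.foldl
      (fun (st : List (String × String) × PySem.Set String) preferred =>
        fields.foldl
          (fun (st : List (String × String) × PySem.Set String) fd =>
            if PySem.Str.lower fd.1 == preferred && !(PySem.Set.contains st.2 (PySem.Str.lower fd.1)) then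
              (st.1 ++ [fd], PySem.Set.add st.2 (PySem.Str.lower fd.1))
            else st)
          st)
      (acc, s)
    = (acc ++ ps.flatMap (fun p => (fields.find? (fun fd => PySem.Str.lower fd.1 == p)).toList),
       s ++ ps.filter (fun p => (fields.find? (fun fd => PySem.Str.lower fd.1 == p)).isSome)) := by
  induction ps generalizing acc s with
  | nil => simp
  | cons p ps ih =>
    simp only [List.foldl_cons]
    cases hfp : fields.find? (fun fd => PySem.Str.lower fd.1 == p) with
    | none =>
      rw [inner_none p fields acc s hfp,
          ih acc s (by simp_all) (fun q hq => hdis q (by simp [hq]))]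
      simp [hfp]
    | some fd0 =>
      rw [inner_some p fields acc s (hdis p (by simp)) fd0 hfp]
      rw [ih (acc ++ [fd0]) (s ++ [p]) (by simp_all)
          (fun q hq => by
            simp only [List.mem_append, List.mem_singleton]
            rintro (h | h)
            · exact hdis q (by simp [hq]) h
            · rw [List.nodup_cons] at hnd; exact hnd.1 (h ▸ hq))]
      simp [hfp]

theorem collect_subset (fs : List (String × String)) (s : List String) :
    ∀ fd ∈ collect fs s, fd ∈ fs := by
  induction fs generalizing s with
  | nil => simp [collect]
  | cons fd fs ih =>
    intro x hx
    simp only [collect] at hx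
    split at hx
    · exact List.mem_cons_of_mem _ (ih s x hx)
    · rcases List.mem_cons.mp hx with h | h
      · simp [h]
      · exact List.mem_cons_of_mem _ (ih _ x h)

theorem collect_not_mem (fs : List (String × String)) (s : List String) :
    ∀ fd ∈ collect fs s, lowerKey fd ∉ s := by
  induction fs generalizing s with
  | nil => simp [collect]
  | cons fd fs ih =>
    intro x hx
    simp only [collect] at hx
    split at hx
    · exact ih s x hx
    · rcases List.mem_cons.mp hx with h | h
      · subst h; assumption
      · intro hmem; exact ih _ x h (by simp [hmem])

theorem collect_mono (fs : List (String × String)) (s t : List String)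
    (h : ∀ x ∈ t, x ∈ s) :
    collect fs s = (collect fs t).filter (fun fd => decide (lowerKey fd ∉ s)) := by
  induction fs generalizing s t with
  | nil => simp [collect]
  | cons fd fs ih =>
    simp only [collect]
    by_cases ht : lowerKey fd ∈ t
    · rw [if_pos ht, if_pos (h _ ht)]
      exact ih s t h
    · rw [if_neg ht]
      by_cases hs : lowerKey fd ∈ s
      · rw [if_pos hs]
        simp only [List.filter_cons, decide_eq_true_eq]
        rw [if_neg (by simp [hs])]
        exact ih s (t ++ [lowerKey fd]) (by
          intro x hx
          rcases List.mem_append.mp hx with h' | h'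
          · exact h x h'
          · simp at h'; simp [h', hs])
      · rw [if_neg hs]
        simp only [List.filter_cons, decide_eq_true_eq]
        rw [if_pos (by simp [hs])]
        have := ih (s ++ [lowerKey fd]) (t ++ [lowerKey fd]) (by
          intro x hx
          rcases List.mem_append.mp hx with h' | h'
          · exact List.mem_append.mpr (Or.inl (h x h'))
          · exact List.mem_append.mpr (Or.inr h'))
        rw [this]
        congr 1
        apply List.filter_congr
        intro x hx
        have hnx := collect_not_mem fs (t ++ [lowerKey fd]) x hx
        simp only [List.mem_append, not_or] at hnx
        simp only [decide_eq_decide, List.mem_append]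
        simp [hnx.2]

theorem collect_filter_eq (fs : List (String × String)) (s : List String) (p : String) :
    (collect fs s).filter (fun fd => PySem.Str.lower fd.1 == p)
    = if p ∈ s then [] else (fs.find? (fun fd => PySem.Str.lower fd.1 == p)).toList := by
  induction fs generalizing s with
  | nil => simp [collect]
  | cons fd fs ih =>
    simp only [collect]
    by_cases hm : lowerKey fd ∈ s
    · rw [if_pos hm, ih]
      by_cases hp : p ∈ s
      · simp [hp]
      · have hne : (PySem.Str.lower fd.1 == p) = false := by
          simp only [beq_eq_false_iff_ne, ne_eq]
          intro he; exact hp (he ▸ hm)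
        rw [if_neg hp, if_neg hp, List.find?_cons, hne]
    · rw [if_neg hm]
      by_cases hl : PySem.Str.lower fd.1 = p
      · have hp : p ∉ s := hl ▸ hm
        rw [if_neg hp]
        simp only [List.filter_cons]
        rw [if_pos (by simp [hl]), List.find?_cons, show (PySem.Str.lower fd.1 == p) = true by simp [hl]]
        rw [ih]
        rw [if_pos (by exact List.mem_append.mpr (Or.inr (by simp [lowerKey, hl])))]
        simp
      · simp only [List.filter_cons]
        rw [if_neg (by simp [hl]), ih, List.find?_cons,
            show (PySem.Str.lower fd.1 == p) = false by simp [hl]]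
        by_cases hp : p ∈ s
        · simp [hp]
        · rw [if_neg (by
              simp only [List.mem_append, List.mem_singleton, not_or]
              exact ⟨hp, fun he => hl (by simp [lowerKey] at he; exact he.symm)⟩), if_neg hp]

theorem insert_group (key : (String × String) → Int) (x : String × String) (A B : List (String × String))
    (hA : ∀ a ∈ A, key a ≤ key x) (hB : ∀ b ∈ B, key x < key b) :
    PySem.List.insertBy (fun a b => decide (key a < key b)) x (A ++ B) = A ++ x :: B := by
  induction A with
  | nil =>
    cases B with
    | nil => rfl
    | cons b bs => simp [PySem.List.insertBy, hB b (by simp)]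
  | cons a as ih =>
    simp only [List.cons_append, PySem.List.insertBy]
    rw [if_neg (by simp only [decide_eq_true_eq, not_lt]; exact hA a (by simp))]
    rw [ih (fun a' ha' => hA a' (by simp [ha']))]

theorem sorted_buckets (key : (String × String) → Int) (vals : List Int) (hv : vals.Pairwise (· < ·))
    (xs : List (String × String)) (h : ∀ x ∈ xs, key x ∈ vals) :
    PySem.List.sorted xs key false
    = vals.flatMap (fun i => xs.filter (fun x => decide (key x = i))) := by
  induction xs using List.reverseRecOn with
  | nil => simp [PySem.List.sorted]
  | append_singleton xs x ih =>
    rw [PySem.List.sorted_eq_foldl_insertBy, List.foldl_append, List.foldl_cons, List.foldl_nil,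
        ← PySem.List.sorted_eq_foldl_insertBy, ih (fun y hy => h y (by simp [hy]))]
    have hx : key x ∈ vals := h x (by simp)
    obtain ⟨L, R, hLR⟩ := List.append_of_mem hx
    subst hLR
    have hpw := hv
    rw [List.pairwise_append] at hpw
    have hL : ∀ l ∈ L, l < key x := fun l hl => hpw.2.2 l hl (key x) (by simp)
    have hR : ∀ r ∈ R, key x < r := by
      have := hpw.2.1
      rw [List.pairwise_cons] at this
      exact this.1
    have hsplit : (L ++ key x :: R).flatMap (fun i => xs.filter (fun y => decide (key y = i)))
        = (L.flatMap (fun i => xs.filter (fun y => decide (key y = i)))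
            ++ xs.filter (fun y => decide (key y = key x)))
          ++ R.flatMap (fun i => xs.filter (fun y => decide (key y = i))) := by
      simp [List.flatMap_append, List.append_assoc]
    rw [hsplit, insert_group key x _ _ ?_ ?_]
    · -- re-assemble to the flatMap over (L ++ key x :: R) of filters over xs ++ [x]
      have hLmap : L.flatMap (fun i => (xs ++ [x]).filter (fun y => decide (key y = i)))
          = L.flatMap (fun i => xs.filter (fun y => decide (key y = i))) :=
        List.flatMap_congr (fun i hi => by
          rw [List.filter_append]
          simp [ne_of_gt (hL i hi)])
      have hRmap : R.flatMap (fun i => (xs ++ [x]).filter (fun y => decide (key y = i)))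
          = R.flatMap (fun i => xs.filter (fun y => decide (key y = i))) :=
        List.flatMap_congr (fun i hi => by
          rw [List.filter_append]
          simp [ne_of_lt (hR i hi)])
      have hxfil : (xs ++ [x]).filter (fun y => decide (key y = key x))
          = xs.filter (fun y => decide (key y = key x)) ++ [x] := by
        rw [List.filter_append]; simp
      rw [List.flatMap_append, List.flatMap_cons, hLmap, hRmap, hxfil]
      simp [List.append_assoc]
    · intro a ha
      rcases List.mem_append.mp ha with h' | h'
      · obtain ⟨i, hi, hai⟩ := List.mem_flatMap.mp h'
        have : key a = i := by simpa using (List.mem_filter.mp hai).2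
        exact le_of_lt (this ▸ hL i hi)
      · have : key a = key x := by simpa using (List.mem_filter.mp h').2
        exact le_of_eq this
    · intro b hb
      obtain ⟨i, hi, hbi⟩ := List.mem_flatMap.mp hb
      have : key b = i := by simpa using (List.mem_filter.mp hbi).2
      exact this ▸ hR i hi

def pvIdx (s : String) : Int :=
  if "date_received" == s then 0
  else if "date_entered" == s then 1
  else if "inspection_date" == s then 2
  else if "last_inspection_date" == s then 3
  else if "last_status_date" == s then 4
  else if "date" == s then 5
  else 6

theorem rank_getD (s : String) :
    PySem.Dict.getD
      ((PySem.List.enumerate pvPrefs).foldl (fun d ip => PySem.Dict.insert d ip.2 ip.1) PySem.Dict.empty)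
      s ((pvPrefs.length : Int)) = pvIdx s := by
  have hd : ((PySem.List.enumerate pvPrefs).foldl (fun d ip => PySem.Dict.insert d ip.2 ip.1) PySem.Dict.empty)
      = PySem.Dict.mk [("date_received", 0), ("date_entered", 1), ("inspection_date", 2),
          ("last_inspection_date", 3), ("last_status_date", 4), ("date", 5)] := by decide
  rw [hd]
  simp only [PySem.Dict.getD, PySem.Dict.get?_mk_cons, pvIdx, pvPrefs]
  split_ifs <;> simp_all [PySem.Dict.get?]

theorem pvIdx_mem (s : String) : pvIdx s ∈ ([0, 1, 2, 3, 4, 5, 6] : List Int) := by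
  unfold pvIdx; split_ifs <;> simp

theorem pvIdx_eq0 (s : String) : pvIdx s = 0 ↔ "date_received" = s := by
  unfold pvIdx; split_ifs <;> simp only [beq_iff_eq] at * <;> (try (subst_vars; decide)) <;> (try simp_all) <;> (try (simp only [eq_comm]; tauto))

theorem pvIdx_eq1 (s : String) : pvIdx s = 1 ↔ "date_entered" = s := by
  unfold pvIdx; split_ifs <;> simp only [beq_iff_eq] at * <;> (try (subst_vars; decide)) <;> (try simp_all) <;> (try (simp only [eq_comm]; tauto))

theorem pvIdx_eq2 (s : String) : pvIdx s = 2 ↔ "inspection_date" = s := by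
  unfold pvIdx; split_ifs <;> simp only [beq_iff_eq] at * <;> (try (subst_vars; decide)) <;> (try simp_all) <;> (try (simp only [eq_comm]; tauto))

theorem pvIdx_eq3 (s : String) : pvIdx s = 3 ↔ "last_inspection_date" = s := by
  unfold pvIdx; split_ifs <;> simp only [beq_iff_eq] at * <;> (try (subst_vars; decide)) <;> (try simp_all) <;> (try (simp only [eq_comm]; tauto))

theorem pvIdx_eq4 (s : String) : pvIdx s = 4 ↔ "last_status_date" = s := by
  unfold pvIdx; split_ifs <;> simp only [beq_iff_eq] at * <;> (try (subst_vars; decide)) <;> (try simp_all) <;> (try (simp only [eq_comm]; tauto))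

theorem pvIdx_eq5 (s : String) : pvIdx s = 5 ↔ "date" = s := by
  unfold pvIdx; split_ifs <;> simp only [beq_iff_eq] at * <;> (try (subst_vars; decide)) <;> (try simp_all) <;> (try (simp only [eq_comm]; tauto))

theorem pvIdx_eq6 (s : String) : pvIdx s = 6 ↔ s ∉ pvPrefs := by
  unfold pvIdx pvPrefs
  split_ifs <;> simp only [beq_iff_eq] at * <;> (try (subst_vars; decide)) <;> (try simp_all) <;>
    (refine ⟨?_, ?_, ?_, ?_, ?_, ?_⟩ <;> (intro h; subst h; simp_all))

theorem A_char (fields : List (String × String)) :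
    order_candidate_fields fields
    = pvPrefs.flatMap (fun p => (fields.find? (fun fd => PySem.Str.lower fd.1 == p)).toList)
      ++ collect fields
          (pvPrefs.filter (fun p => (fields.find? (fun fd => PySem.Str.lower fd.1 == p)).isSome)) := by
  unfold order_candidate_fields
  rw [show (PySem.Set.empty : PySem.Set String) = ([] : List String) from rfl]
  rw [phase1 fields pvPrefs [] [] (by decide) (by simp)]
  simp only [List.nil_append]
  rw [dedup_foldl]

theorem B_char (fields : List (String × String)) :
    order_candidate_fields_alt fields
    = PySem.List.sorted (collect fields []) (fun fd => pvIdx (PySem.Str.lower fd.1)) false := by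
  unfold order_candidate_fields_alt
  rw [show (PySem.Set.empty : PySem.Set String) = ([] : List String) from rfl]
  rw [dedup_foldl]
  simp only [List.nil_append]
  congr 1
  funext fd
  exact rank_getD (PySem.Str.lower fd.1)

theorem filter_idx_eq (fields : List (String × String)) (k : Int) (p : String)
    (hk : ∀ s : String, pvIdx s = k ↔ p = s) :
    (collect fields []).filter (fun y => decide (pvIdx (PySem.Str.lower y.1) = k))
    = (fields.find? (fun fd => PySem.Str.lower fd.1 == p)).toList := by
  have h1 : (collect fields []).filter (fun y => decide (pvIdx (PySem.Str.lower y.1) = k))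
      = (collect fields []).filter (fun fd => PySem.Str.lower fd.1 == p) := by
    apply List.filter_congr
    intro x _
    by_cases h : PySem.Str.lower x.1 = p
    · have hpk : pvIdx p = k := (hk p).mpr rfl
      simp [h, hpk]
    · have hpk : pvIdx (PySem.Str.lower x.1) ≠ k := fun hc => h ((hk _).mp hc).symm
      simp [hpk, h]
  rw [h1, collect_filter_eq]
  simp

theorem main_eq (fields : List (String × String)) :
    order_candidate_fields fields = order_candidate_fields_alt fields := by
  rw [A_char, B_char]
  rw [sorted_buckets _ ([0, 1, 2, 3, 4, 5, 6] : List Int) (by decide) _ (fun x _ => pvIdx_mem _)]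
  have h6 : (collect fields []).filter (fun y => decide (pvIdx (PySem.Str.lower y.1) = 6))
      = collect fields
          (pvPrefs.filter (fun p => (fields.find? (fun fd => PySem.Str.lower fd.1 == p)).isSome)) := by
    rw [collect_mono fields
        (pvPrefs.filter (fun p => (fields.find? (fun fd => PySem.Str.lower fd.1 == p)).isSome)) []
        (by simp)]
    apply List.filter_congr
    intro x hx
    simp only [decide_eq_decide]
    rw [pvIdx_eq6]
    constructor
    · intro hnp hm
      exact hnp (List.mem_of_mem_filter hm)
    · intro hnm hp
      apply hnm
      rw [List.mem_filter]
      refine ⟨hp, ?_⟩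
      rw [List.find?_isSome]
      exact ⟨x, collect_subset fields [] x hx, by simp [lowerKey]⟩
  simp only [pvPrefs, List.flatMap_cons, List.flatMap_nil, List.append_nil]
  rw [filter_idx_eq fields 0 "date_received" pvIdx_eq0,
      filter_idx_eq fields 1 "date_entered" pvIdx_eq1,
      filter_idx_eq fields 2 "inspection_date" pvIdx_eq2,
      filter_idx_eq fields 3 "last_inspection_date" pvIdx_eq3,
      filter_idx_eq fields 4 "last_status_date" pvIdx_eq4,
      filter_idx_eq fields 5 "date" pvIdx_eq5]
  rw [h6]
  simp [pvPrefs, List.append_assoc]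

-- ===== VERDICT (by name: the statement is the Claim_ definition above) =====
theorem order_candidate_fields_spec : Claim_equal_order_candidate_fields := by
  intro fields _
  show order_candidate_fields fields = order_candidate_fields_alt fields
  exact main_eq fields
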